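-- pv_equiv track=rewrite | github.com/ksomemo/Competitive-programming | atcoder/abc/117/D.py | digit_dp
-- ===== SOURCE A (Python) =====
-- def digit_dp(N, K, A):
--     """桁DP: TODO
--
--     http://drken1215.hatenablog.com/entry/2019/02/03/224200
--     http://drken1215.hatenablog.com/entry/2019/02/04/013700
--     https://qiita.com/nomikura/items/25883985ea148c3cf999
--     """
--     # dp[i桁見る][未満フラグ] = 総数
--     dp = [[0] * 2 for _ in range(100)]
--
--     for i in range(100):
--         dp[i][0] = dp[i][1] = -1
--
--     dp[40][0] = 0
--     for d in range(40-1, -1, -1):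
--         mask = 1 << d
--         num = 0
--         for a in A:
--             if a & mask:
--                 num += 1
--
--         # 未満: 1つ上の桁
--         if dp[d+1][1] >= 0:
--             dp[d][1] = max(dp[d][1], dp[d+1][1] + mask * max(num, N-num))
--
--         # 一致: 1つ上の桁
--         if dp[d+1][0] >= 0:
--             if K & (1 << d):
--                 dp[d][1] = max(dp[d][1], dp[d+1][0] + mask * num)
--                 dp[d][0] = max(dp[d][0], dp[d+1][0] + mask * (N-num))
--             else:
--                 dp[d][0] = max(dp[d][0], dp[d+1][0] + mask * num)
--
--     ans = max(dp[0][0], dp[0][1])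
--     return ans
-- ===== SOURCE B (Python) =====
-- def digit_dp(N, K, A):
--     """Top-down recursive reformulation of the same digit DP.
--
--     solve(d, less) = best obtainable sum from bits d-1..0, given whether the
--     chosen prefix is already strictly below K's prefix.  The bit-set counts
--     are precomputed once.  Answer = solve(40, False).
--     """
--     num = [sum(1 for a in A if a & (1 << d)) for d in range(40)]
--
--     def solve(d, less):
--         if d == 0:
--             return 0
--         mask = 1 << (d - 1)
--         n = num[d - 1]
--         if less:
--             return mask * max(n, N - n) + solve(d - 1, True)
--         if K & mask:
--             return max(mask * n + solve(d - 1, True),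
--                        mask * (N - n) + solve(d - 1, False))
--         return mask * n + solve(d - 1, False)
--
--     return solve(40, False)
-- ===== Notes on version B (the rewrite author's own statement) =====
-- stated objective: idiomatic
-- what changed: Replaces A's 100-row bottom-up DP table with -1 'unreachable' sentinels and per-row guard checks by a direct top-down recursion solve(d, less) over the 40 bits with precomputed per-bit counts; the sentinel bookkeeping disappears because the recursion only ever visits reachable states.
import Mathlib
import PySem

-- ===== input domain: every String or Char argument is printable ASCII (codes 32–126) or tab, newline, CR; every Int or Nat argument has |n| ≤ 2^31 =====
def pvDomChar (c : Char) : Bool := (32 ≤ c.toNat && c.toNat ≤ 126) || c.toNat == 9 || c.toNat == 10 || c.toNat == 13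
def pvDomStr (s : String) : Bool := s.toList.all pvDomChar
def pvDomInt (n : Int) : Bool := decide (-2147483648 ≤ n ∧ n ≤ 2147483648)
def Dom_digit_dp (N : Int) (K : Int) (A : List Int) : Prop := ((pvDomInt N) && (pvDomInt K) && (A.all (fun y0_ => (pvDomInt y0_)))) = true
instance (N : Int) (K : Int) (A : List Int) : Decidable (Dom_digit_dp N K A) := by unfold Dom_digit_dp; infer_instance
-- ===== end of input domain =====

-- B replaces A's 100-row bottom-up table with -1 "unreachable" sentinels by a
-- top-down recursion solve(d, less) over the 40 bits (objective: idiomatic).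

-- ===== PORT A =====
-- body of A's loop 'for d in range(40-1, -1, -1)'; dp rows dp[i] are pairs (dp[i][0], dp[i][1])
def dpStep (N : Int) (K : Int) (A : List Int) (dp : List (Int × Int)) (d : Int) : List (Int × Int) :=
  let mask : Int := (1 : Int) <<< d.toNat
  let num : Int := A.foldl (fun num a => if PySem.Int.band a mask ≠ 0 then num + 1 else num) 0
  let prev := dp.getD (d.toNat + 1) (0, 0)
  let cur := dp.getD d.toNat (0, 0)
  -- 未満: 1つ上の桁
  let cur := if prev.2 ≥ 0 then (cur.1, max cur.2 (prev.2 + mask * max num (N - num))) else cur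
  -- 一致: 1つ上の桁
  let cur :=
    if prev.1 ≥ 0 then
      if PySem.Int.band K ((1 : Int) <<< d.toNat) ≠ 0 then
        (max cur.1 (prev.1 + mask * (N - num)), max cur.2 (prev.1 + mask * num))
      else
        (max cur.1 (prev.1 + mask * num), cur.2)
    else cur
  dp.set d.toNat cur

def digit_dp (N : Int) (K : Int) (A : List Int) : Int :=
  let dp : List (Int × Int) := (List.range 100).map (fun _ => ((0 : Int), (0 : Int)))
  let dp := (PySem.List.pyRange 0 100 1).foldl (fun dp i => dp.set i.toNat (-1, -1)) dp
  let dp := dp.set 40 (0, -1)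
  let dp := (PySem.List.pyRange (40 - 1) (-1) (-1)).foldl (dpStep N K A) dp
  max (dp.getD 0 (0, 0)).1 (dp.getD 0 (0, 0)).2

-- ===== PORT B =====
-- num = [sum(1 for a in A if a & (1 << d)) for d in range(40)]
def altNums (A : List Int) : List Int :=
  (PySem.List.pyRange 0 40 1).map
    (fun d => ((A.countP (fun a => PySem.Int.band a ((1 : Int) <<< d.toNat) ≠ 0) : Nat) : Int))

-- solve(d, less): best sum obtainable from bits d-1..0 (list indexing num[d-1] is always in range)
def altSolve (N : Int) (K : Int) (nums : List Int) : Nat → Bool → Int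
  | 0, _ => 0
  | d + 1, less =>
    let mask : Int := (1 : Int) <<< d
    let n : Int := nums.getD d 0
    if less then mask * max n (N - n) + altSolve N K nums d true
    else if PySem.Int.band K mask ≠ 0 then
      max (mask * n + altSolve N K nums d true) (mask * (N - n) + altSolve N K nums d false)
    else mask * n + altSolve N K nums d false

def digit_dp_alt (N : Int) (K : Int) (A : List Int) : Int :=
  altSolve N K (altNums A) 40 false

-- ===== PRECONDITION & SPEC =====
def Spec_digit_dp (N : Int) (K : Int) (A : List Int) (out : Int) : Prop := out = digit_dp_alt N K A
instance (N : Int) (K : Int) (A : List Int) (out : Int) : Decidable (Spec_digit_dp N K A out) := by unfold Spec_digit_dp; infer_instance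

-- ===== CLAIM (what is proved, stated in full; the proofs are below) =====
def Claim_equal_digit_dp : Prop := ∀ (N : Int) (K : Int) (A : List Int), Dom_digit_dp N K A → Spec_digit_dp N K A (digit_dp N K A)

-- ===== LEMMAS AND PROOFS =====

lemma one_shl_cast (n : Nat) : (1 : Int) <<< ((n : Int)) = 2 ^ n := by
  simp [Int.shiftLeft_eq_mul_pow]

-- number of elements of A with bit d set
def numI (A : List Int) (d : Nat) : Int :=
  ((A.countP (fun a => PySem.Int.band a ((2 : Int) ^ d) ≠ 0) : Nat) : Int)

-- exact contents of A's dp rows: dpPair k = (dp[40-k][0], dp[40-k][1]) after k loop steps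
def dpPair (N : Int) (K : Int) (A : List Int) : Nat → Int × Int
  | 0 => (0, -1)
  | k + 1 =>
    let p := dpPair N K A k
    let d := 39 - k
    let m : Int := 2 ^ d
    let n := numI A d
    let b := if p.2 ≥ 0 then max (-1) (p.2 + m * max n (N - n)) else -1
    if p.1 ≥ 0 then
      if PySem.Int.band K ((2 : Int) ^ d) ≠ 0 then
        (max (-1) (p.1 + m * (N - n)), max b (p.1 + m * n))
      else
        (max (-1) (p.1 + m * n), b)
    else (-1, b)

lemma countFold (m : Int) (A : List Int) (c : Int) :
    A.foldl (fun num a => if PySem.Int.band a m ≠ 0 then num + 1 else num) c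
      = c + ((A.countP (fun a => PySem.Int.band a m ≠ 0) : Nat) : Int) := by
  induction A generalizing c with
  | nil => simp
  | cons a t ih =>
    simp only [List.foldl_cons, List.countP_cons, ih]
    by_cases h : PySem.Int.band a m ≠ 0
    · simp [h]
      omega
    · simp [h]

lemma getD_set_self {α : Type} (l : List α) (i : Nat) (a d : α) (h : i < l.length) :
    (l.set i a).getD i d = a := by
  simp [List.getD_eq_getElem?_getD, List.getElem?_set_self h]

lemma getD_set_ne {α : Type} (l : List α) {i j : Nat} (a d : α) (h : i ≠ j) :
    (l.set i a).getD j d = l.getD j d := by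
  simp [List.getD_eq_getElem?_getD, List.getElem?_set_ne h]

-- state invariant of A's main loop: rows r..40 filled, rows below r still (-1,-1)
def StInv (N : Int) (K : Int) (A : List Int) (r : Nat) (S : List (Int × Int)) : Prop :=
  S.length = 100 ∧
    ∀ j, j < 100 → S.getD j (0, 0) =
      if r ≤ j ∧ j ≤ 40 then dpPair N K A (40 - j) else (-1, -1)

def stepFun (N : Int) (K : Int) (A : List Int) (r : Nat) (p c : Int × Int) : Int × Int :=
  let m : Int := 2 ^ r
  let n := numI A r
  let c1 := if p.2 ≥ 0 then (c.1, max c.2 (p.2 + m * max n (N - n))) else c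
  if p.1 ≥ 0 then
    if PySem.Int.band K ((2 : Int) ^ r) ≠ 0 then
      (max c1.1 (p.1 + m * (N - n)), max c1.2 (p.1 + m * n))
    else (max c1.1 (p.1 + m * n), c1.2)
  else c1

lemma dpStep_eq (N : Int) (K : Int) (A : List Int) (S : List (Int × Int)) (r : Nat) :
    dpStep N K A S (r : Int)
      = S.set r (stepFun N K A r (S.getD (r + 1) (0, 0)) (S.getD r (0, 0))) := by
  simp only [dpStep, stepFun, Int.toNat_natCast, Int.shiftLeft_eq, one_mul, countFold, zero_add, numI]

lemma stepFun_dpPair (N : Int) (K : Int) (A : List Int) (r : Nat) (hr : r ≤ 39) :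
    stepFun N K A r (dpPair N K A (39 - r)) (-1, -1) = dpPair N K A (40 - r) := by
  rw [show 40 - r = (39 - r) + 1 from by omega]
  simp only [dpPair, stepFun, show 39 - (39 - r) = r from by omega]
  by_cases hp1 : (dpPair N K A (39 - r)).1 ≥ 0 <;>
    by_cases hp2 : (dpPair N K A (39 - r)).2 ≥ 0 <;>
      by_cases hkb : PySem.Int.band K ((2 : Int) ^ r) ≠ 0 <;>
        simp [hp1, hp2, hkb]

lemma stepInv (N : Int) (K : Int) (A : List Int) (r : Nat) (hr : r ≤ 39)
    (S : List (Int × Int)) (h : StInv N K A (r + 1) S) :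
    StInv N K A r (dpStep N K A S (r : Int)) := by
  obtain ⟨hlen, hget⟩ := h
  have hprev : S.getD (r + 1) (0, 0) = dpPair N K A (39 - r) := by
    rw [hget (r + 1) (by omega), if_pos ⟨le_refl _, by omega⟩]
    congr 1
    omega
  have hcur : S.getD r (0, 0) = (-1, -1) := by
    rw [hget r (by omega), if_neg (by omega)]
  rw [dpStep_eq, hprev, hcur, stepFun_dpPair N K A r hr]
  refine ⟨by simp [hlen], ?_⟩
  intro j hj
  rcases eq_or_ne j r with rfl | hne
  · rw [getD_set_self _ _ _ _ (by omega), if_pos ⟨le_refl _, by omega⟩]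
  · rw [getD_set_ne _ _ _ (Ne.symm hne), hget j hj]
    by_cases hc : r + 1 ≤ j ∧ j ≤ 40
    · rw [if_pos hc, if_pos ⟨by omega, hc.2⟩]
    · rw [if_neg hc, if_neg (by omega)]

lemma loopInv (N : Int) (K : Int) (A : List Int) :
    ∀ (r : Nat), r ≤ 40 → ∀ (S : List (Int × Int)), StInv N K A r S →
      ((PySem.List.pyRange ((r : Int) - 1) (-1) (-1)).foldl (dpStep N K A) S).getD 0 (0, 0)
        = dpPair N K A 40 := by
  intro r
  induction r with
  | zero =>
    intro _ S hS
    rw [PySem.List.pyRange_neg_one_eq_nil (by norm_num)]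
    simpa using hS.2 0 (by omega)
  | succ r ih =>
    intro hr S hS
    rw [show (((r : Nat) + 1 : Nat) : Int) - 1 = (r : Int) from by push_cast; ring,
        PySem.List.pyRange_neg_one_cons (by omega),
        List.foldl_cons]
    exact ih (by omega) _ (stepInv N K A r (by omega) S hS)

lemma digit_dp_eq_dpPair (N : Int) (K : Int) (A : List Int) :
    digit_dp N K A = max (dpPair N K A 40).1 (dpPair N K A 40).2 := by
  have hinit : (((PySem.List.pyRange 0 100 1).foldl (fun dp i => dp.set i.toNat (-1, -1))
      ((List.range 100).map (fun _ => ((0 : Int), (0 : Int))))).set 40 ((0 : Int), (-1 : Int)))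
      = (List.replicate 100 ((-1 : Int), (-1 : Int))).set 40 (0, -1) := by decide
  have hS : StInv N K A 40 ((List.replicate 100 ((-1 : Int), (-1 : Int))).set 40 (0, -1)) := by
    refine ⟨by simp, ?_⟩
    intro j hj
    rcases eq_or_ne j 40 with rfl | hne
    · rw [getD_set_self _ _ _ _ (by simp), if_pos ⟨le_refl _, le_refl _⟩]
      rfl
    · rw [getD_set_ne _ _ _ (Ne.symm hne), if_neg (by omega)]
      rw [List.getD_eq_getElem?_getD, List.getElem?_replicate, if_pos hj, Option.getD_some]
  have hfold := loopInv N K A 40 (le_refl _) _ hS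
  simp only [digit_dp]
  rw [hinit]
  rw [show ((40 : Int) - 1) = ((40 : Nat) : Int) - 1 from by norm_num]
  rw [hfold]

lemma altNums_getD (A : List Int) (d : Nat) (h : d < 40) :
    (altNums A).getD d 0 = numI A d := by
  unfold altNums numI
  rw [PySem.List.pyRange_one, List.map_map, List.getD_eq_getElem?_getD,
      show ((40:Int) - 0).toNat = 40 from by decide,
      List.getElem?_map, List.getElem?_range h]
  simp only [Function.comp, Option.map_some, Option.getD_some]
  congr 2
  funext a
  congr 2
  rw [show (((0:Int) + (d:Int)).toNat : Int) = (d : Int) by omega, one_shl_cast]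

lemma numI_nonneg (A : List Int) (d : Nat) : 0 ≤ numI A d := by
  unfold numI; positivity

lemma altSolve_false_le_true (N : Int) (K : Int) (nums : List Int) (d : Nat) :
    altSolve N K nums d false ≤ altSolve N K nums d true := by
  induction d with
  | zero => simp [altSolve]
  | succ d ih =>
    simp only [altSolve]
    have hm : (0:Int) ≤ (1 : Int) <<< d := by
      rw [Int.shiftLeft_eq]; positivity
    have m1 : (1:Int) <<< d * nums.getD d 0 ≤ (1:Int) <<< d * max (nums.getD d 0) (N - nums.getD d 0) :=
      mul_le_mul_of_nonneg_left (le_max_left _ _) hm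
    have m2 : (1:Int) <<< d * (N - nums.getD d 0) ≤ (1:Int) <<< d * max (nums.getD d 0) (N - nums.getD d 0) :=
      mul_le_mul_of_nonneg_left (le_max_right _ _) hm
    generalize (1:Int) <<< d * nums.getD d 0 = a at m1
    generalize (1:Int) <<< d * (N - nums.getD d 0) = b at m2
    generalize (1:Int) <<< d * max (nums.getD d 0) (N - nums.getD d 0) = c at m1 m2 ⊢
    split_ifs with hk <;> omega

-- "would-be answer" combining dp row 40-k with the best continuation from B's solve
def Wv (N : Int) (K : Int) (A : List Int) (k : Nat) : Int :=
  let p := dpPair N K A k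
  if p.1 ≥ 0 then
    if p.2 ≥ 0 then
      max (p.1 + altSolve N K (altNums A) (40 - k) false)
          (p.2 + altSolve N K (altNums A) (40 - k) true)
    else p.1 + altSolve N K (altNums A) (40 - k) false
  else p.2 + altSolve N K (altNums A) (40 - k) true

lemma altSolve_succ_true (N : Int) (K : Int) (A : List Int) (d : Nat) (h : d < 40) :
    altSolve N K (altNums A) (d + 1) true =
      (2:Int)^d * max (numI A d) (N - numI A d) + altSolve N K (altNums A) d true := by
  simp only [altSolve, altNums_getD A d h]
  simp [Int.shiftLeft_eq]

lemma altSolve_succ_false (N : Int) (K : Int) (A : List Int) (d : Nat) (h : d < 40) :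
    altSolve N K (altNums A) (d + 1) false =
      if PySem.Int.band K ((2:Int)^d) ≠ 0 then
        max ((2:Int)^d * numI A d + altSolve N K (altNums A) d true)
            ((2:Int)^d * (N - numI A d) + altSolve N K (altNums A) d false)
      else (2:Int)^d * numI A d + altSolve N K (altNums A) d false := by
  simp only [altSolve, altNums_getD A d h]
  simp [Int.shiftLeft_eq]

lemma mainInv (N : Int) (K : Int) (A : List Int) :
    ∀ (k : Nat), k ≤ 40 →
      ((dpPair N K A k).1 < 0 → (dpPair N K A k).2 ≥ 0) ∧
        Wv N K A k = altSolve N K (altNums A) 40 false := by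
  intro k
  induction k with
  | zero =>
    intro _
    refine ⟨by simp [dpPair], ?_⟩
    simp [Wv, dpPair]
  | succ k ih =>
    intro hk
    obtain ⟨hlive, hW⟩ := ih (by omega)
    clear ih
    have hd40 : 39 - k < 40 := by omega
    have hstep : dpPair N K A (k + 1) =
        (let p := dpPair N K A k
         let b := if p.2 ≥ 0 then
             max (-1) (p.2 + (2:Int)^(39-k) * max (numI A (39-k)) (N - numI A (39-k))) else -1
         if p.1 ≥ 0 then
           if PySem.Int.band K ((2:Int)^(39-k)) ≠ 0 then
             (max (-1) (p.1 + (2:Int)^(39-k) * (N - numI A (39-k))),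
              max b (p.1 + (2:Int)^(39-k) * numI A (39-k)))
           else
             (max (-1) (p.1 + (2:Int)^(39-k) * numI A (39-k)), b)
         else (-1, b)) := by
      simp only [dpPair]
    have h40k : 40 - k = (39 - k) + 1 := by omega
    have h40k1 : 40 - (k + 1) = 39 - k := by omega
    simp only [Wv] at hW ⊢
    rw [hstep, h40k1]
    rw [h40k, altSolve_succ_true N K A (39-k) hd40, altSolve_succ_false N K A (39-k) hd40] at hW
    have hm : (0:Int) < 2^(39-k) := by positivity
    have hn0 : 0 ≤ numI A (39-k) := numI_nonneg A (39-k)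
    have hfs : altSolve N K (altNums A) (39-k) false ≤ altSolve N K (altNums A) (39-k) true :=
      altSolve_false_le_true N K (altNums A) (39-k)
    have hac : (2:Int)^(39-k) * numI A (39-k) ≤ (2:Int)^(39-k) * max (numI A (39-k)) (N - numI A (39-k)) := mul_le_mul_of_nonneg_left (le_max_left _ _) (le_of_lt hm)
    have hbc : (2:Int)^(39-k) * (N - numI A (39-k)) ≤ (2:Int)^(39-k) * max (numI A (39-k)) (N - numI A (39-k)) := mul_le_mul_of_nonneg_left (le_max_right _ _) (le_of_lt hm)
    have ha0 : 0 ≤ (2:Int)^(39-k) * numI A (39-k) := mul_nonneg (le_of_lt hm) hn0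
    by_cases hkb : PySem.Int.band K ((2:Int)^(39-k)) ≠ 0
    · -- K has bit 39-k set
      simp only [if_pos hkb] at hW ⊢
      by_cases hp1 : (dpPair N K A k).1 ≥ 0
      · simp only [if_pos hp1] at hW ⊢
        by_cases hx : (0:Int) ≤ (dpPair N K A k).1 + (2:Int)^(39-k) * (N - numI A (39-k))
        · -- tight chain stays alive
          by_cases hp2 : (dpPair N K A k).2 ≥ 0
          · simp only [if_pos hp2] at hW ⊢
            rw [← hW]
            generalize (2:Int)^(39-k) * max (numI A (39-k)) (N - numI A (39-k)) = c at *
            generalize (2:Int)^(39-k) * numI A (39-k) = a at *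
            generalize (2:Int)^(39-k) * (N - numI A (39-k)) = b at *
            split_ifs <;> omega
          · simp only [if_neg hp2] at hW ⊢
            rw [← hW]
            generalize (2:Int)^(39-k) * max (numI A (39-k)) (N - numI A (39-k)) = c at *
            generalize (2:Int)^(39-k) * numI A (39-k) = a at *
            generalize (2:Int)^(39-k) * (N - numI A (39-k)) = b at *
            split_ifs <;> omega
        · -- tight chain dies here: N - num < 0, the branch at this bit dominates
          have hNn : N - numI A (39-k) < 0 := by
            by_contra h
            exact hx (add_nonneg hp1 (mul_nonneg (le_of_lt hm) (by omega)))
          have hba : (2:Int)^(39-k) * (N - numI A (39-k)) ≤ (2:Int)^(39-k) * numI A (39-k) :=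
            mul_le_mul_of_nonneg_left (by omega) (le_of_lt hm)
          by_cases hp2 : (dpPair N K A k).2 ≥ 0
          · simp only [if_pos hp2] at hW ⊢
            rw [← hW]
            generalize (2:Int)^(39-k) * max (numI A (39-k)) (N - numI A (39-k)) = c at *
            generalize (2:Int)^(39-k) * numI A (39-k) = a at *
            generalize (2:Int)^(39-k) * (N - numI A (39-k)) = b at *
            split_ifs <;> omega
          · simp only [if_neg hp2] at hW ⊢
            rw [← hW]
            generalize (2:Int)^(39-k) * max (numI A (39-k)) (N - numI A (39-k)) = c at *
            generalize (2:Int)^(39-k) * numI A (39-k) = a at *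
            generalize (2:Int)^(39-k) * (N - numI A (39-k)) = b at *
            split_ifs <;> omega
      · -- tight chain already dead: only the less chain remains
        have hp2 : (dpPair N K A k).2 ≥ 0 := hlive (by omega)
        simp only [if_neg hp1, if_pos hp2] at hW ⊢
        rw [← hW]
        generalize (2:Int)^(39-k) * max (numI A (39-k)) (N - numI A (39-k)) = c at *
        generalize (2:Int)^(39-k) * numI A (39-k) = a at *
        split_ifs <;> omega
    · -- K's bit 39-k is unset
      simp only [if_neg hkb] at hW ⊢
      by_cases hp1 : (dpPair N K A k).1 ≥ 0
      · by_cases hp2 : (dpPair N K A k).2 ≥ 0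
        · simp only [if_pos hp1, if_pos hp2] at hW ⊢
          rw [← hW]
          generalize (2:Int)^(39-k) * max (numI A (39-k)) (N - numI A (39-k)) = c at *
          generalize (2:Int)^(39-k) * numI A (39-k) = a at *
          split_ifs <;> omega
        · simp only [if_pos hp1, if_neg hp2] at hW ⊢
          rw [← hW]
          generalize (2:Int)^(39-k) * max (numI A (39-k)) (N - numI A (39-k)) = c at *
          generalize (2:Int)^(39-k) * numI A (39-k) = a at *
          split_ifs <;> omega
      · have hp2 : (dpPair N K A k).2 ≥ 0 := hlive (by omega)
        simp only [if_neg hp1, if_pos hp2] at hW ⊢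
        rw [← hW]
        generalize (2:Int)^(39-k) * max (numI A (39-k)) (N - numI A (39-k)) = c at *
        generalize (2:Int)^(39-k) * numI A (39-k) = a at *
        split_ifs <;> omega

-- ===== VERDICT (by name: the statement is the Claim_ definition above) =====
theorem digit_dp_spec : Claim_equal_digit_dp := by
  intro N K A _
  unfold Spec_digit_dp digit_dp_alt
  obtain ⟨hlive, hW⟩ := mainInv N K A 40 (le_refl _)
  rw [digit_dp_eq_dpPair, ← hW]
  unfold Wv
  simp only [altSolve]
  split_ifs with h0 h1 <;> [skip; skip; skip] <;> omega
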